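-- pv_equiv track=rewrite | github.com/RamananVr/Leetcodepython | sql_simulation_sliding_window/0601_human_traffic_of_stadium.py | human_traffic_of_stadium
-- ===== SOURCE A (Python) =====
-- from typing import List, Tuple
--
-- def human_traffic_of_stadium(stadium: List[Tuple[int, str, int]]) -> List[Tuple[int, str, int]]:
--     """
--     Simulates the SQL query to find rows with three or more consecutive days
--     where the number of people is greater than or equal to 100.
--
--     Args:
--     stadium (List[Tuple[int, str, int]]): List of tuples representing the stadium table.
--
--     Returns:
--     List[Tuple[int, str, int]]: Filtered rows meeting the condition.
--     """
--     # Sort the input by visit_date (assuming it's already sorted in the input)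
--     stadium.sort(key=lambda x: x[1])
--
--     result = []
--     n = len(stadium)
--
--     for i in range(n - 2):
--         # Check if three consecutive rows have people >= 100
--         if (stadium[i][2] >= 100 and
--             stadium[i + 1][2] >= 100 and
--             stadium[i + 2][2] >= 100):
--             result.append(stadium[i])
--             result.append(stadium[i + 1])
--             result.append(stadium[i + 2])
--
--     # Remove duplicates while maintaining order
--     seen = set()
--     filtered_result = []
--     for row in result:
--         if row not in seen:
--             filtered_result.append(row)
--             seen.add(row)
--
--     return filtered_result
-- ===== SOURCE B (Python) =====
-- def human_traffic_of_stadium(stadium):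
--     # Sort in place by visit_date, like A (the argument mutation is preserved).
--     stadium.sort(key=lambda x: x[1])
--     n = len(stadium)
--     rows = []
--     start = 0  # start index of the current run of rows with people >= 100
--     for j in range(n):
--         if stadium[j][2] < 100:
--             if j - start >= 3:
--                 rows.extend(stadium[start:j])
--             start = j + 1
--     if n - start >= 3:
--         rows.extend(stadium[start:n])
--     return list(dict.fromkeys(rows))
-- ===== Notes on version B (the rewrite author's own statement) =====
-- stated objective: simpler
-- what changed: Replaces the overlapping triple-window scan (which emits each qualifying row up to three times and then deduplicates with a seen-set loop) by a single pass that detects maximal runs of rows with people>=100 and appends each run of length>=3 once, deduplicating with dict.fromkeys.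
import Mathlib
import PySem

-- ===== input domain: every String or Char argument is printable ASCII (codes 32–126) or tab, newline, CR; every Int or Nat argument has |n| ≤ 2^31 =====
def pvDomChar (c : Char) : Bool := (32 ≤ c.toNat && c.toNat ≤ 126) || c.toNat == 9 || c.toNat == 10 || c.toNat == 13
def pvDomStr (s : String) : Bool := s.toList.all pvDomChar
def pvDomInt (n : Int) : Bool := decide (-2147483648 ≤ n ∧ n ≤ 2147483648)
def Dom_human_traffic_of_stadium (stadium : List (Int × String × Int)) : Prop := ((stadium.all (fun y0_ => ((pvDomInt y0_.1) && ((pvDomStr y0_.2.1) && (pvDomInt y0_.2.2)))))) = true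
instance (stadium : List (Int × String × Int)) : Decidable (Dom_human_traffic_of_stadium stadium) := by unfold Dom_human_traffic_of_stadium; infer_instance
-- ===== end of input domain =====

-- B replaces A's overlapping triple-window scan + seen-set dedup by a single maximal-run scan (simpler);
-- both sort the input in place (the equivalence proved is about the return value; B performs the same sort mutation).

-- default row used by the total indexing primitive (indices in both ports are always in range)
def pvDflt : Int × String × Int := (0, "", 0)

-- ===== PORT A =====
def human_traffic_of_stadium (stadium : List (Int × String × Int)) : List (Int × String × Int) :=
  let s := PySem.List.sorted stadium (fun x => x.2.1) false
  let n : Int := PySem.List.len s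
  let result := (PySem.List.pyRange 0 (n - 2) 1).foldl (fun result i =>
    if (PySem.List.pyGetD s i pvDflt).2.2 ≥ 100 ∧
       (PySem.List.pyGetD s (i + 1) pvDflt).2.2 ≥ 100 ∧
       (PySem.List.pyGetD s (i + 2) pvDflt).2.2 ≥ 100 then
      ((result ++ [PySem.List.pyGetD s i pvDflt]) ++ [PySem.List.pyGetD s (i + 1) pvDflt])
        ++ [PySem.List.pyGetD s (i + 2) pvDflt]
    else result) []
  let st := result.foldl (fun (st : PySem.Set (Int × String × Int) × List (Int × String × Int)) row =>
    if PySem.Set.contains st.1 row then st else (PySem.Set.add st.1 row, st.2 ++ [row]))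
    (PySem.Set.empty, [])
  st.2

-- ===== PORT B =====
def human_traffic_of_stadium_alt (stadium : List (Int × String × Int)) : List (Int × String × Int) :=
  let s := PySem.List.sorted stadium (fun x => x.2.1) false
  let n : Int := PySem.List.len s
  let st := (PySem.List.pyRange 0 n 1).foldl (fun (st : List (Int × String × Int) × Int) j =>
    if (PySem.List.pyGetD s j pvDflt).2.2 < 100 then
      (if j - st.2 ≥ 3 then st.1 ++ PySem.List.slice s (some st.2) (some j) else st.1, j + 1)
    else st) ([], 0)
  let rows := if n - st.2 ≥ 3 then st.1 ++ PySem.List.slice s (some st.2) (some n) else st.1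
  PySem.List.dedup rows

-- ===== PRECONDITION & SPEC =====
def Spec_human_traffic_of_stadium (stadium : List (Int × String × Int)) (out : List (Int × String × Int)) : Prop := out = human_traffic_of_stadium_alt stadium
instance (stadium : List (Int × String × Int)) (out : List (Int × String × Int)) : Decidable (Spec_human_traffic_of_stadium stadium out) := by unfold Spec_human_traffic_of_stadium; infer_instance

-- ===== CLAIM (what is proved, stated in full; the proofs are below) =====
def Claim_equal_human_traffic_of_stadium : Prop := ∀ (stadium : List (Int × String × Int)), Dom_human_traffic_of_stadium stadium → Spec_human_traffic_of_stadium stadium (human_traffic_of_stadium stadium)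

-- ===== LEMMAS AND PROOFS =====

theorem pvFilterOfList {α : Type} [BEq α] [LawfulBEq α] (q : α → Bool) :
    ∀ (m : List α), (PySem.Set.ofList m).filter q = PySem.Set.ofList (m.filter q) := by
  intro m
  induction m with
  | nil => rfl
  | cons x m ih =>
    rw [PySem.Set.ofList_cons]
    show List.filter q (x :: List.filter (fun y => !y == x) (PySem.Set.ofList m)) = _
    by_cases hq : q x = true
    · simp only [List.filter_cons, hq, if_true, List.filter_filter, PySem.Set.ofList_cons]
      rw [show List.filter (fun a => q a && !a == x) (PySem.Set.ofList m)
            = List.filter (fun a => (!a == x) && q a) (PySem.Set.ofList m) from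
          List.filter_congr (fun y _ => Bool.and_comm _ _), ← List.filter_filter, ih]
      rfl
    · simp only [List.filter_cons, hq, if_false, List.filter_filter,
        Bool.false_eq_true, ← ih]
      apply List.filter_congr
      intro y _
      by_cases hqy : q y = true
      · have hyx : (y == x) = false := by
          by_cases h : y = x
          · subst h; exact absurd hqy hq
          · simp [h]
        simp [hqy, hyx]
      · simp [Bool.eq_false_iff.mpr hqy]

theorem pvDedupMapDedup {α β : Type} [BEq α] [LawfulBEq α] [BEq β] [LawfulBEq β] (f : α → β) :
    ∀ (m : List α), PySem.List.dedup ((PySem.List.dedup m).map f) = PySem.List.dedup (m.map f) := by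
  intro m
  induction hn : m.length using Nat.strong_induction_on generalizing m with
  | _ n ih =>
  cases m with
  | nil => rfl
  | cons x m =>
    have hdc : PySem.List.dedup (x :: m) = x :: PySem.List.dedup (m.filter (fun y => !y == x)) := by
      simp only [PySem.List.dedup_eq_ofList, PySem.Set.ofList_cons, PySem.Set.discard,
        pvFilterOfList]
    have hlt : (m.filter (fun y => !y == x)).length < n := by
      subst hn; simpa using Nat.lt_succ_of_le (List.length_filter_le _ m)
    have IH := ih _ hlt (m.filter (fun y => !y == x)) rfl
    rw [hdc]
    simp only [List.map_cons]
    simp only [PySem.List.dedup_eq_ofList, PySem.Set.ofList_cons, PySem.Set.discard] at IH ⊢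
    rw [pvFilterOfList, pvFilterOfList]
    congr 1
    rw [← pvFilterOfList, IH, pvFilterOfList]
    rw [List.filter_map, List.filter_map, List.filter_filter]
    congr 2
    apply List.filter_congr
    intro y _
    by_cases h : f y == f x
    · simp [h]
    · have : (y == x) = false := by
        by_cases hyx : y = x
        · subst hyx; simp at h
        · simp [hyx]
      simp [h, this]

def pvP (s : List (Int × String × Int)) (k : Nat) : Bool := decide ((s.getD k pvDflt).2.2 ≥ 100)
def pvCond (s : List (Int × String × Int)) (i : Nat) : Bool := pvP s i && pvP s (i+1) && pvP s (i+2)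
def pvW (s : List (Int × String × Int)) (i : Nat) : List Nat := if pvCond s i then [i, i+1, i+2] else []
def pvCB (s : List (Int × String × Int)) (m j : Nat) : Bool :=
  (List.range m).any (fun i => pvCond s i && decide (i ≤ j) && decide (j ≤ i + 2))
def pvCov (s : List (Int × String × Int)) (j : Nat) : Bool := pvCond s (j-2) || pvCond s (j-1) || pvCond s j
def pvF (s : List (Int × String × Int)) (k : Nat) : Int × String × Int := s.getD k pvDflt

theorem pvP_lt {s k} (h : pvP s k = true) : k < s.length := by
  by_contra hk
  rw [pvP, List.getD_eq_getElem?_getD, List.getElem?_eq_none (by omega)] at h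
  simp [pvDflt] at h

theorem pvCond_lt {s i} (h : pvCond s i = true) : i + 2 < s.length := by
  rw [pvCond] at h
  simp only [Bool.and_eq_true] at h
  exact pvP_lt h.2

theorem pvCB_iff {s m j} : pvCB s m j = true ↔ ∃ i, i < m ∧ pvCond s i = true ∧ i ≤ j ∧ j ≤ i + 2 := by
  simp [pvCB, List.any_eq_true]
  tauto

theorem pvCov_iff {s j} : pvCov s j = true ↔ ∃ i, pvCond s i = true ∧ i ≤ j ∧ j ≤ i + 2 := by
  constructor
  · intro h
    rw [pvCov] at h
    simp only [Bool.or_eq_true] at h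
    rcases h with (h | h) | h
    · exact ⟨j-2, h, by omega, by omega⟩
    · exact ⟨j-1, h, by omega, by omega⟩
    · exact ⟨j, h, by omega, by omega⟩
  · rintro ⟨i, hc, h1, h2⟩
    have : i = j - 2 ∨ i = j - 1 ∨ i = j := by omega
    rw [pvCov]
    rcases this with h | h | h <;> subst h <;> simp [hc]

theorem pvMemFlat {s m j} : j ∈ (List.range m).flatMap (pvW s) ↔ pvCB s m j = true := by
  rw [pvCB_iff]
  simp only [List.mem_flatMap, List.mem_range, pvW]
  constructor
  · rintro ⟨i, hi, hj⟩
    by_cases hc : pvCond s i = true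
    · rw [if_pos hc] at hj
      simp only [List.mem_cons, List.not_mem_nil, or_false] at hj
      exact ⟨i, hi, hc, by omega⟩
    · simp [hc] at hj
  · rintro ⟨i, hi, hc, h1, h2⟩
    refine ⟨i, hi, ?_⟩
    rw [if_pos hc]
    have : j = i ∨ j = i + 1 ∨ j = i + 2 := by omega
    simp [List.mem_cons]
    omega

theorem pvCB_lt {s m j} (h : j < m) : pvCB s (m+1) j = pvCB s m j := by
  rw [pvCB, pvCB, List.range_succ, List.any_append]
  simp only [List.any_cons, List.any_nil, Bool.or_false]
  have : decide (m ≤ j) = false := by simp; omega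
  simp [this]

theorem pvCB_false_ext {s m j} (hc : pvCond s m = false) : pvCB s (m+1) j = pvCB s m j := by
  rw [pvCB, pvCB, List.range_succ, List.any_append]
  simp [hc]

theorem pvCB_top {s m} : pvCB s m (m+2) = false := by
  by_contra h
  rw [Bool.not_eq_false, pvCB_iff] at h
  obtain ⟨i, hi, _, _, h2⟩ := h
  omega

theorem pvCB_succ_mm {s m} (h : pvCB s m (m+1) = true) : pvCB s m m = true := by
  rw [pvCB_iff] at h ⊢
  obtain ⟨i, hi, hc, h1, h2⟩ := h
  exact ⟨i, hi, hc, by omega, by omega⟩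


theorem pvContains_iff_cB {s : List (Int × String × Int)} {m j : Nat} :
    (PySem.Set.ofList ((List.range m).flatMap (pvW s))).contains j = pvCB s m j := by
  cases h : pvCB s m j with
  | true => exact (PySem.Set.contains_iff _ _).mpr ((PySem.Set.mem_ofList _ _).mpr (pvMemFlat.mpr h))
  | false =>
    apply Bool.eq_false_iff.mpr
    intro hc
    have := pvMemFlat.mp ((PySem.Set.mem_ofList _ _).mp ((PySem.Set.contains_iff _ _).mp hc))
    rw [this] at h
    exact Bool.true_eq_false ▸ (by simp at h)

theorem pvDedupWindows (s : List (Int × String × Int)) :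
    ∀ m, PySem.List.dedup ((List.range m).flatMap (pvW s)) = (List.range (m+2)).filter (pvCB s m) := by
  intro m
  induction m with
  | zero =>
    show PySem.List.dedup [] = _
    have h0 : (List.range (0+2)).filter (pvCB s 0) = [] := by
      apply List.eq_nil_iff_forall_not_mem.mpr
      intro j hj
      rw [List.mem_filter] at hj
      simp [pvCB] at hj
    rw [h0]
    rfl
  | succ m ih =>
    rw [List.range_succ, List.flatMap_append, List.flatMap_cons, List.flatMap_nil, List.append_nil]
    rw [PySem.List.dedup_eq_ofList, PySem.Set.ofList_append, PySem.Set.update_eq_append_filter]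
    by_cases hc : pvCond s m = true
    · have hnd : ([m, m+1, m+2] : List Nat).Nodup := by
        simp [List.nodup_cons]
      rw [pvW, if_pos hc, PySem.Set.ofList_eq_self_of_nodup _ hnd]
      have hfilt : List.filter (fun y => !(PySem.Set.ofList ((List.range m).flatMap (pvW s))).contains y) [m, m+1, m+2]
          = List.filter (fun y => !pvCB s m y) [m, m+1, m+2] :=
        List.filter_congr (fun y _ => by rw [pvContains_iff_cB])
      rw [hfilt, ← PySem.List.dedup_eq_ofList, ih]
      have hR : (List.range (m+1+2)).filter (pvCB s (m+1))
          = (List.range m).filter (pvCB s m) ++ [m, m+1, m+2] := by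
        have hr3 : List.range (m+1+2) = List.range m ++ [m, m+1, m+2] := by
          rw [show m+1+2 = m+3 by ring, List.range_add]
          rfl
        rw [hr3, List.filter_append]
        congr 1
        · exact List.filter_congr (fun j hj => pvCB_lt (List.mem_range.mp hj))
        · have hcb : ∀ j, m ≤ j → j ≤ m + 2 → pvCB s (m+1) j = true := fun j h1 h2 =>
            pvCB_iff.mpr ⟨m, by omega, hc, h1, h2⟩
          simp only [List.filter_cons, List.filter_nil,
            hcb m (by omega) (by omega), hcb (m+1) (by omega) (by omega),
            hcb (m+2) (by omega) (by omega), if_true]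
      rw [hR]
      have hL : (List.range (m+2)).filter (pvCB s m)
          = (List.range m).filter (pvCB s m) ++ List.filter (pvCB s m) [m, m+1] := by
        have hr2 : List.range (m+2) = List.range m ++ [m, m+1] := by
          rw [List.range_add]; rfl
        rw [hr2, List.filter_append]
      rw [hL, List.append_assoc]
      congr 1
      have h2 := @pvCB_top s m
      by_cases h1 : pvCB s m (m+1) = true
      · have h0 := pvCB_succ_mm h1
        simp [h0, h1, h2]
      · rw [Bool.not_eq_true] at h1
        by_cases h0 : pvCB s m m = true
        · simp [h0, h1, h2]
        · rw [Bool.not_eq_true] at h0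
          simp [h0, h1, h2]
    · rw [Bool.not_eq_true] at hc
      have hw : pvW s m = [] := by rw [pvW, hc]; simp
      rw [hw]
      show PySem.Set.ofList _ ++ List.filter _ [] = _
      rw [List.filter_nil, List.append_nil, ← PySem.List.dedup_eq_ofList, ih]
      have hr : List.range (m+1+2) = List.range (m+2) ++ [m+2] := by
        rw [show m+1+2 = m+2+1 by ring, List.range_succ]
      rw [hr, List.filter_append]
      have hend : pvCB s (m+1) (m+2) = false := by
        apply Bool.eq_false_iff.mpr
        intro h
        obtain ⟨i, hi, hci, hle, hge⟩ := pvCB_iff.mp h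
        have him : i = m := by omega
        rw [him, hc] at hci
        simp at hci
      rw [List.filter_cons, hend]
      simp only [Bool.false_eq_true, if_false, List.filter_nil, List.append_nil]
      exact (List.filter_congr (fun j _ => pvCB_false_ext hc)).symm

theorem pvSeenFold {β : Type} [BEq β] [LawfulBEq β] :
    ∀ (l : List β) (s0 : PySem.Set β),
      l.foldl (fun (st : PySem.Set β × List β) row =>
          if PySem.Set.contains st.1 row then st else (PySem.Set.add st.1 row, st.2 ++ [row])) (s0, s0)
        = (PySem.Set.update s0 l, PySem.Set.update s0 l) := by
  intro l
  induction l with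
  | nil => intro s0; rfl
  | cons x l ih =>
    intro s0
    rw [List.foldl_cons, PySem.Set.update_cons]
    by_cases h : x ∈ s0
    · rw [if_pos ((PySem.Set.contains_iff _ _).mpr h), PySem.Set.add_of_mem h] at *
      exact ih s0
    · have hc : PySem.Set.contains s0 x = false :=
        Bool.eq_false_iff.mpr (fun hh => h ((PySem.Set.contains_iff _ _).mp hh))
      rw [hc]
      simp only [Bool.false_eq_true, if_false]
      rw [PySem.Set.add_of_not_mem h]
      exact ih (s0 ++ [x])

theorem pvCond_p3 {s i} (h : pvCond s i = true) :
    pvP s i = true ∧ pvP s (i+1) = true ∧ pvP s (i+2) = true := by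
  rw [pvCond] at h
  simp only [Bool.and_eq_true] at h
  exact ⟨h.1.1, h.1.2, h.2⟩

theorem pvCov_p {s j} (h : pvCov s j = true) : pvP s j = true := by
  obtain ⟨i, hc, h1, h2⟩ := pvCov_iff.mp h
  obtain ⟨p0, p1, p2⟩ := pvCond_p3 hc
  have : j = i ∨ j = i + 1 ∨ j = i + 2 := by omega
  rcases this with h | h | h <;> rw [h] <;> assumption

theorem pvCov_eq_cB (s : List (Int × String × Int)) (j : Nat) :
    pvCov s j = pvCB s (s.length - 2) j := by
  rw [Bool.eq_iff_iff, pvCov_iff, pvCB_iff]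
  constructor
  · rintro ⟨i, hc, h1, h2⟩
    have := pvCond_lt hc
    exact ⟨i, by omega, hc, h1, h2⟩
  · rintro ⟨i, _, hc, h1, h2⟩
    exact ⟨i, hc, h1, h2⟩

theorem pvSliceMap (s : List (Int × String × Int)) (b t : Nat) (hb : b ≤ t) (ht : t ≤ s.length) :
    ((List.range (t - b)).map (fun x => b + x)).map (pvF s) = (s.drop b).take (t - b) := by
  apply List.ext_getElem
  · simp
    omega
  · intro i h1 h2
    simp only [List.getElem_map, List.getElem_range, List.getElem_take, List.getElem_drop]
    rw [pvF, List.getD_eq_getElem?_getD, List.getElem?_eq_getElem (by simp at h1; omega)]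
    rfl

theorem pvFlush (s : List (Int × String × Int)) {b t : Nat} (hb : b ≤ t) (ht : t ≤ s.length)
    (hpt : pvP s t = false)
    (hprev : b = 0 ∨ pvP s (b-1) = false)
    (hrun : ∀ k, b ≤ k → k < t → pvP s k = true) :
    (if (t:Int) - (b:Int) ≥ 3 then
        ((List.range b).filter (pvCov s)).map (pvF s) ++ PySem.List.slice s (some (b:Int)) (some (t:Int))
      else ((List.range b).filter (pvCov s)).map (pvF s))
      = ((List.range (t+1)).filter (pvCov s)).map (pvF s) := by
  have hcovt : pvCov s t = false :=
    Bool.eq_false_iff.mpr (fun h => by rw [pvCov_p h] at hpt; simp at hpt)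
  have hsplit : List.range (t+1) = List.range b ++ (List.range (t-b)).map (fun x => b + x) ++ [t] := by
    rw [show t + 1 = b + ((t - b) + 1) by omega, List.range_add, List.range_succ, List.map_append,
      List.append_assoc]
    congr 2
    simp
    omega
  by_cases h3 : (3:Int) ≤ (t:Int) - (b:Int)
  · rw [if_pos h3]
    have h3n : b + 3 ≤ t := by omega
    have hcov : ∀ k, b ≤ k → k < t → pvCov s k = true := by
      intro k hk1 hk2
      have hi : ∃ i, pvCond s i = true ∧ i ≤ k ∧ k ≤ i + 2 := by
        refine ⟨min k (t - 3), ?_, by omega, by omega⟩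
        rw [pvCond]
        have e1 := hrun (min k (t-3)) (by omega) (by omega)
        have e2 := hrun (min k (t-3) + 1) (by omega) (by omega)
        have e3 := hrun (min k (t-3) + 2) (by omega) (by omega)
        simp [e1, e2, e3]
      exact pvCov_iff.mpr hi
    rw [hsplit, List.filter_append, List.filter_append, List.filter_cons, hcovt]
    simp only [Bool.false_eq_true, if_false, List.filter_nil, List.append_nil]
    have hmid : List.filter (pvCov s) ((List.range (t-b)).map (fun x => b + x))
        = (List.range (t-b)).map (fun x => b + x) := List.filter_eq_self.mpr (by
      intro a ha
      simp only [List.mem_map, List.mem_range] at ha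
      obtain ⟨x, hx, rfl⟩ := ha
      exact hcov _ (by omega) (by omega))
    rw [hmid, List.map_append, pvSliceMap s b t hb ht, PySem.List.slice_natCast]
  · rw [if_neg h3]
    have hnotcov : ∀ k, b ≤ k → k ≤ t → pvCov s k = false := by
      intro k hk1 hk2
      apply Bool.eq_false_iff.mpr
      intro h
      obtain ⟨i, hc, h1, h2⟩ := pvCov_iff.mp h
      obtain ⟨p0, p1, p2⟩ := pvCond_p3 hc
      have hib : b ≤ i := by
        by_contra hib
        rcases hprev with h0 | hbp
        · omega
        · have hcase : b - 1 = i ∨ b - 1 = i + 1 ∨ b - 1 = i + 2 := by omega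
          have hp : pvP s (b-1) = true := by
            rcases hcase with h | h | h <;> rw [h] <;> assumption
          rw [hp] at hbp
          simp at hbp
      have hit : i + 2 < t := by
        by_contra hit
        have hcase : t = i ∨ t = i + 1 ∨ t = i + 2 := by omega
        have hp : pvP s t = true := by
          rcases hcase with h | h | h <;> rw [h] <;> assumption
        rw [hp] at hpt
        simp at hpt
      omega
    rw [hsplit, List.filter_append, List.filter_append, List.filter_cons, hcovt]
    simp only [Bool.false_eq_true, if_false, List.filter_nil, List.append_nil]
    have hmid : List.filter (pvCov s) ((List.range (t-b)).map (fun x => b + x)) = [] :=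
      List.filter_eq_nil_iff.mpr (by
        intro a ha
        simp only [List.mem_map, List.mem_range] at ha
        obtain ⟨x, hx, rfl⟩ := ha
        rw [hnotcov _ (by omega) (by omega)]
        simp)
    rw [hmid, List.append_nil]

theorem pvBLoop (s : List (Int × String × Int)) :
    ∀ t : Nat, t ≤ s.length →
    ∃ b : Nat, (PySem.List.pyRange 0 (t:Int) 1).foldl
        (fun (st : List (Int × String × Int) × Int) j =>
          if (PySem.List.pyGetD s j pvDflt).2.2 < 100 then
            (if j - st.2 ≥ 3 then st.1 ++ PySem.List.slice s (some st.2) (some j) else st.1, j + 1)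
          else st) ([], 0)
      = (((List.range b).filter (pvCov s)).map (pvF s), (b:Int))
      ∧ b ≤ t ∧ (∀ k, b ≤ k → k < t → pvP s k = true) ∧ (b = 0 ∨ pvP s (b-1) = false) := by
  intro t
  induction t with
  | zero =>
    intro _
    refine ⟨0, ?_, le_refl _, by omega, Or.inl rfl⟩
    rw [show ((0:Nat):Int) = 0 by rfl, PySem.List.pyRange_one_eq_nil (by omega)]
    rfl
  | succ t ih =>
    intro hlen
    obtain ⟨b, hfold, hb, hrun, hprev⟩ := ih (by omega)
    have hcast : ((t.succ : Nat) : Int) = (t:Int) + 1 := by push_cast; ring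
    rw [hcast, PySem.List.pyRange_one_succ_right (by positivity), List.foldl_append, hfold,
      List.foldl_cons, List.foldl_nil]
    simp only [PySem.List.pyGetD_natCast]
    by_cases hp : pvP s t = true
    · have hge : ¬ ((s.getD t pvDflt).2.2 < 100) := by
        rw [pvP, decide_eq_true_iff] at hp
        omega
      rw [if_neg hge]
      refine ⟨b, rfl, by omega, ?_, hprev⟩
      intro k h1 h2
      rcases Nat.lt_succ_iff_lt_or_eq.mp h2 with h | h
      · exact hrun k h1 h
      · exact h ▸ hp
    · rw [Bool.not_eq_true] at hp
      have hlt : (s.getD t pvDflt).2.2 < 100 := by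
        rw [pvP, decide_eq_false_iff_not] at hp
        omega
      rw [if_pos hlt]
      refine ⟨t+1, ?_, le_refl _, by omega, Or.inr (by simpa using hp)⟩
      have hflush := pvFlush s hb (by omega) hp hprev hrun
      rw [hflush, show ((t+1 : Nat) : Int) = (t:Int) + 1 by push_cast; ring]

-- A's window fold, characterised
theorem pvAChar (stadium : List (Int × String × Int)) :
    human_traffic_of_stadium stadium
      = PySem.List.dedup ((((List.range ((PySem.List.sorted stadium (fun x => x.2.1) false).length - 2)).flatMap
          (pvW (PySem.List.sorted stadium (fun x => x.2.1) false))).map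
          (pvF (PySem.List.sorted stadium (fun x => x.2.1) false))) ) := by
  unfold human_traffic_of_stadium
  set s := PySem.List.sorted stadium (fun x => x.2.1) false with hs
  simp only [PySem.List.len_eq, PySem.List.pyRange_one, List.foldl_map, Int.sub_zero]
  have hM : (((s.length : Int)) - 2).toNat = s.length - 2 := by omega
  rw [hM]
  have hbody : (fun (acc : List (Int × String × Int)) (k : Nat) =>
      if (PySem.List.pyGetD s (0 + (k:Int)) pvDflt).2.2 ≥ 100 ∧
         (PySem.List.pyGetD s (0 + (k:Int) + 1) pvDflt).2.2 ≥ 100 ∧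
         (PySem.List.pyGetD s (0 + (k:Int) + 2) pvDflt).2.2 ≥ 100 then
        ((acc ++ [PySem.List.pyGetD s (0 + (k:Int)) pvDflt]) ++ [PySem.List.pyGetD s (0 + (k:Int) + 1) pvDflt])
          ++ [PySem.List.pyGetD s (0 + (k:Int) + 2) pvDflt]
      else acc)
      = (fun acc k => acc ++ (pvW s k).map (pvF s)) := by
    funext acc k
    simp only [zero_add]
    rw [show ((k:Int) + 1) = ((k+1 : Nat):Int) by push_cast; ring,
        show ((k:Int) + 2) = ((k+2 : Nat):Int) by push_cast; ring]
    simp only [PySem.List.pyGetD_natCast]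
    by_cases hc : pvCond s k = true
    · obtain ⟨p0, p1, p2⟩ := pvCond_p3 hc
      rw [pvP, decide_eq_true_iff] at p0 p1 p2
      rw [if_pos ⟨p0, p1, p2⟩, pvW, if_pos hc]
      simp [pvF]
    · rw [Bool.not_eq_true] at hc
      have hnc : ¬((s.getD k pvDflt).2.2 ≥ 100 ∧ (s.getD (k+1) pvDflt).2.2 ≥ 100 ∧
          (s.getD (k+2) pvDflt).2.2 ≥ 100) := by
        intro h
        have hct : pvCond s k = true := by
          rw [pvCond, pvP, pvP, pvP]
          simp only [Bool.and_eq_true, decide_eq_true_iff]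
          exact ⟨⟨h.1, h.2.1⟩, h.2.2⟩
        simp [hct] at hc
      rw [if_neg hnc, pvW]
      rw [hc]
      simp
  rw [hbody, PySem.List.foldl_append_eq_flatMap, List.nil_append, ← List.map_flatMap]
  rw [show ((PySem.Set.empty, ([] : List (Int × String × Int))) :
        PySem.Set (Int × String × Int) × List (Int × String × Int))
      = (([] : PySem.Set (Int × String × Int)), ([] : List (Int × String × Int))) from rfl]
  rw [pvSeenFold, PySem.Set.update_nil_left]
  rfl

-- B's run scan, characterised
theorem pvAltChar (stadium : List (Int × String × Int)) :
    human_traffic_of_stadium_alt stadium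
      = PySem.List.dedup (((List.range (PySem.List.sorted stadium (fun x => x.2.1) false).length).filter
          (pvCov (PySem.List.sorted stadium (fun x => x.2.1) false))).map
          (pvF (PySem.List.sorted stadium (fun x => x.2.1) false))) := by
  unfold human_traffic_of_stadium_alt
  set s := PySem.List.sorted stadium (fun x => x.2.1) false with hs
  simp only [PySem.List.len_eq]
  obtain ⟨b, hfold, hb, hrun, hprev⟩ := pvBLoop s s.length (le_refl _)
  rw [hfold]
  have hpN : pvP s s.length = false :=
    Bool.eq_false_iff.mpr (fun h => absurd (pvP_lt h) (lt_irrefl _))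
  have hflush := pvFlush s hb (le_refl _) hpN hprev hrun
  dsimp only
  rw [hflush]
  have hcovN : pvCov s s.length = false :=
    Bool.eq_false_iff.mpr (fun h => absurd (pvP_lt (pvCov_p h)) (lt_irrefl _))
  rw [List.range_succ, List.filter_append, List.filter_cons, hcovN]
  simp only [Bool.false_eq_true, if_false, List.filter_nil, List.append_nil]

-- the two index lists coincide after ordered dedup
theorem pvIdxBridge (s : List (Int × String × Int)) :
    (List.range (s.length - 2 + 2)).filter (pvCB s (s.length - 2))
      = (List.range s.length).filter (pvCov s) := by
  by_cases hN : 2 ≤ s.length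
  · rw [show s.length - 2 + 2 = s.length by omega]
    exact (List.filter_congr (fun j _ => pvCov_eq_cB s j)).symm
  · have hL : (List.range (s.length - 2 + 2)).filter (pvCB s (s.length - 2)) = [] := by
      apply List.filter_eq_nil_iff.mpr
      intro j _
      rw [show s.length - 2 = 0 by omega]
      intro h
      obtain ⟨i, hi, _, _, _⟩ := pvCB_iff.mp h
      omega
    have hR : (List.range s.length).filter (pvCov s) = [] := by
      apply List.filter_eq_nil_iff.mpr
      intro j _ h
      obtain ⟨i, hc, _, _⟩ := pvCov_iff.mp h
      have := pvCond_lt hc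
      omega
    rw [hL, hR]

-- ===== VERDICT (by name: the statement is the Claim_ definition above) =====
theorem human_traffic_of_stadium_spec : Claim_equal_human_traffic_of_stadium := by
  intro stadium _
  unfold Spec_human_traffic_of_stadium
  rw [pvAChar, pvAltChar, ← pvDedupMapDedup, pvDedupWindows, pvIdxBridge]
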